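-- pv_equiv track=rewrite | github.com/opengauss-mirror/openGauss-server | src/gausskernel/dbmind/dbmind/common/utils/checking.py | is_identifier_correct
-- ===== SOURCE A (Python) =====
-- def is_identifier_correct(url: str):
--     # A correct DSN url is similar to:
--     # postgres://username:pwd@host:port/dbname
--     # Hence, we can limit the number of identifiers to prevent bad url.
--     identifiers = {
--         '@': 1,
--         ':': 3,
--         '/': 3
--     }
--     for ident, limit in identifiers.items():
--         if url.count(ident) > limit:
--             return False, "Incorrect URL because you haven't encoded the identifier %s."
--     return True, None
-- ===== SOURCE B (Python) =====
-- def is_identifier_correct(url: str):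
--     # Single pass: tally all delimiters simultaneously, fail as soon as one
--     # exceeds its limit (instead of three separate url.count scans).
--     limits = {'@': 1, ':': 3, '/': 3}
--     counts = {'@': 0, ':': 0, '/': 0}
--     for ch in url:
--         if ch in counts:
--             counts[ch] += 1
--             if counts[ch] > limits[ch]:
--                 return False, "Incorrect URL because you haven't encoded the identifier %s."
--     return True, None
-- ===== Notes on version B (the rewrite author's own statement) =====
-- stated objective: alternative
-- what changed: Replaces three separate url.count scans (one per delimiter) with a single pass over the characters maintaining per-delimiter counters and returning as soon as any counter exceeds its limit.
import Mathlib
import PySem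

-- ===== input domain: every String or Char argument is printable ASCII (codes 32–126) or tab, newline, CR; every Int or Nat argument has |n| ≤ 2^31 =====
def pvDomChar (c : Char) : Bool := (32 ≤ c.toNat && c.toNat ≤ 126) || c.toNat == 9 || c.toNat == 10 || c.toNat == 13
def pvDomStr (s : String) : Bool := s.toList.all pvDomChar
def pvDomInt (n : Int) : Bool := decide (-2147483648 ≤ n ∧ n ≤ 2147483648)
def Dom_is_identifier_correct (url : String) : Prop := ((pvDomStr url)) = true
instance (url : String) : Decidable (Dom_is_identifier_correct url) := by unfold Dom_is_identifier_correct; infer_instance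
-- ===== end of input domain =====

-- B replaces A's three url.count scans by a single pass with three counters; objective: alternative.

def pvErrMsg : String := "Incorrect URL because you haven't encoded the identifier %s."

-- ===== PORT A =====
-- the 'for ident, limit in identifiers.items()' loop with early return
def pvALoop (url : String) : List (String × Int) → Bool × Option String
  | [] => (true, none)
  | (ident, limit) :: rest =>
      if (PySem.Str.count url ident : Int) > limit then (false, some pvErrMsg)
      else pvALoop url rest

def is_identifier_correct (url : String) : Bool × Option String :=
  let identifiers : PySem.Dict String Int :=
    PySem.Dict.ofList [("@", 1), (":", 3), ("/", 3)]
  pvALoop url identifiers.items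

-- ===== PORT B =====
-- the single pass: three counters, early return when one exceeds its limit
def pvBLoop : List Char → Nat → Nat → Nat → Bool × Option String
  | [], _, _, _ => (true, none)
  | ch :: rest, a, c, s =>
      if ch = '@' then
        if a + 1 > 1 then (false, some pvErrMsg) else pvBLoop rest (a + 1) c s
      else if ch = ':' then
        if c + 1 > 3 then (false, some pvErrMsg) else pvBLoop rest a (c + 1) s
      else if ch = '/' then
        if s + 1 > 3 then (false, some pvErrMsg) else pvBLoop rest a c (s + 1)
      else pvBLoop rest a c s

def is_identifier_correct_alt (url : String) : Bool × Option String :=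
  pvBLoop url.toList 0 0 0

-- ===== PRECONDITION & SPEC =====
def Spec_is_identifier_correct (url : String) (out : Bool × Option String) : Prop := out = is_identifier_correct_alt url
instance (url : String) (out : Bool × Option String) : Decidable (Spec_is_identifier_correct url out) := by unfold Spec_is_identifier_correct; infer_instance

-- ===== CLAIM (what is proved, stated in full; the proofs are below) =====
def Claim_equal_is_identifier_correct : Prop := ∀ (url : String), Dom_is_identifier_correct url → Spec_is_identifier_correct url (is_identifier_correct url)

-- ===== LEMMAS AND PROOFS =====

-- Chars.count with a single-character needle is List.count
theorem pv_count_go_single (c : Char) :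
    ∀ (fuel : Nat) (s : List Char) (acc : Nat), s.length ≤ fuel →
      PySem.Chars.count.go [c] fuel s acc = acc + s.count c := by
  intro fuel
  induction fuel with
  | zero =>
      intro s acc h
      cases s with
      | nil => simp [PySem.Chars.count.go]
      | cons x t => simp at h
  | succ n ih =>
      intro s acc h
      cases s with
      | nil => simp [PySem.Chars.count.go]
      | cons x t =>
          simp only [PySem.Chars.count.go]
          by_cases hx : x = c
          · subst hx
            simp only [List.isPrefixOf]
            simp only [List.length_cons, Nat.succ_le_succ_iff] at h
            simp [List.drop, ih t (acc + 1) h]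
            omega
          · have : List.isPrefixOf [c] (x :: t) = false := by
              simp [List.isPrefixOf]; exact fun h' => absurd h'.symm hx
            simp only [this, Bool.false_eq_true, if_false]
            simp only [List.length_cons, Nat.succ_le_succ_iff] at h
            simp [ih t acc h, hx]

theorem pv_str_count_single (url : String) (c : Char) :
    PySem.Str.count url (String.ofList [c]) = url.toList.count c := by
  rw [PySem.Str.count_eq]
  have hl : (String.ofList [c]).toList = [c] := by simp
  rw [hl]
  unfold PySem.Chars.count
  rw [if_neg (by simp)]
  simpa using pv_count_go_single c url.toList.length url.toList 0 (le_refl _)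

-- B's loop returns according to the final counts (counters only grow)
theorem pv_bloop_char (cs : List Char) :
    ∀ (a c s : Nat), a ≤ 1 → c ≤ 3 → s ≤ 3 →
      pvBLoop cs a c s =
        (if a + cs.count '@' > 1 ∨ c + cs.count ':' > 3 ∨ s + cs.count '/' > 3
         then (false, some pvErrMsg) else (true, none)) := by
  induction cs with
  | nil => intro a c s ha hc hs; simp [pvBLoop]; omega
  | cons ch rest ih =>
      intro a c s ha hc hs
      by_cases h1 : ch = '@'
      · subst h1
        have hstep : pvBLoop ('@' :: rest) a c s =
            if a + 1 > 1 then (false, some pvErrMsg) else pvBLoop rest (a + 1) c s := by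
          simp [pvBLoop]
        rw [hstep, List.count_cons_self, List.count_cons_of_ne (by decide),
            List.count_cons_of_ne (by decide)]
        by_cases hgt : a + 1 > 1
        · rw [if_pos hgt, if_pos (Or.inl (by omega))]
        · rw [if_neg hgt, ih (a + 1) c s (by omega) hc hs]
          exact if_congr (by omega) rfl rfl
      · by_cases h2 : ch = ':'
        · subst h2
          have hstep : pvBLoop (':' :: rest) a c s =
              if c + 1 > 3 then (false, some pvErrMsg) else pvBLoop rest a (c + 1) s := by
            simp [pvBLoop]
          rw [hstep, List.count_cons_self, List.count_cons_of_ne (by decide),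
              List.count_cons_of_ne (by decide)]
          by_cases hgt : c + 1 > 3
          · rw [if_pos hgt, if_pos (Or.inr (Or.inl (by omega)))]
          · rw [if_neg hgt, ih a (c + 1) s ha (by omega) hs]
            exact if_congr (by omega) rfl rfl
        · by_cases h3 : ch = '/'
          · subst h3
            have hstep : pvBLoop ('/' :: rest) a c s =
                if s + 1 > 3 then (false, some pvErrMsg) else pvBLoop rest a c (s + 1) := by
              simp [pvBLoop]
            rw [hstep, List.count_cons_self, List.count_cons_of_ne (by decide),
                List.count_cons_of_ne (by decide)]
            by_cases hgt : s + 1 > 3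
            · rw [if_pos hgt, if_pos (Or.inr (Or.inr (by omega)))]
            · rw [if_neg hgt, ih a c (s + 1) ha hc (by omega)]
              exact if_congr (by omega) rfl rfl
          · have hstep : pvBLoop (ch :: rest) a c s = pvBLoop rest a c s := by
              simp [pvBLoop, h1, h2, h3]
            rw [hstep, List.count_cons_of_ne h1, List.count_cons_of_ne h2,
                List.count_cons_of_ne h3, ih a c s ha hc hs]


-- ===== VERDICT (by name: the statement is the Claim_ definition above) =====
theorem is_identifier_correct_spec : Claim_equal_is_identifier_correct := by
  intro url _
  show is_identifier_correct url = is_identifier_correct_alt url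
  show pvALoop url (PySem.Dict.ofList [(("@" : String), (1 : Int)), (":", 3), ("/", 3)]).items
      = pvBLoop url.toList 0 0 0
  have hitems : (PySem.Dict.ofList [(("@" : String), (1 : Int)), (":", 3), ("/", 3)]).items
      = [("@", 1), (":", 3), ("/", 3)] := by decide
  rw [hitems]
  simp only [pvALoop]
  rw [pv_bloop_char url.toList 0 0 0 (by omega) (by omega) (by omega)]
  have h1 : PySem.Str.count url "@" = url.toList.count '@' := pv_str_count_single url '@'
  have h2 : PySem.Str.count url ":" = url.toList.count ':' := pv_str_count_single url ':'
  have h3 : PySem.Str.count url "/" = url.toList.count '/' := pv_str_count_single url '/'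
  rw [h1, h2, h3]
  by_cases c1 : url.toList.count '@' > 1
  · have : ((url.toList.count '@' : Int) > 1) := by exact_mod_cast c1
    simp [this, c1]
  · have n1 : ¬ ((url.toList.count '@' : Int) > 1) := by exact_mod_cast c1
    by_cases c2 : url.toList.count ':' > 3
    · have : ((url.toList.count ':' : Int) > 3) := by exact_mod_cast c2
      simp [n1, this, c2]
    · have n2 : ¬ ((url.toList.count ':' : Int) > 3) := by exact_mod_cast c2
      by_cases c3 : url.toList.count '/' > 3
      · have : ((url.toList.count '/' : Int) > 3) := by exact_mod_cast c3
        simp [n1, n2, this, c3]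
      · have n3 : ¬ ((url.toList.count '/' : Int) > 3) := by exact_mod_cast c3
        simp [n1, n2, n3, c1, c2, c3]
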